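-- pv_equiv track=rewrite | github.com/virtual-context/virtual-context | virtual_context/core/temporal_resolver.py | _value_kinds
-- ===== SOURCE A (Python) =====
-- def _value_kinds(values: set[str]) -> set[str]:
--     kinds: set[str] = set()
--     for token in values:
--         if token.endswith("%"):
--             kinds.add("percentage")
--         else:
--             kinds.add("numeric")
--     return kinds
-- ===== SOURCE B (Python) =====
-- def _value_kinds(values: set[str]) -> set[str]:
--     vals = list(values)
--     if not vals:
--         return set()
--     first = "percentage" if vals[0].endswith("%") else "numeric"
--     other = "numeric" if first == "percentage" else "percentage"
--     kinds = {first}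
--     if any(("percentage" if t.endswith("%") else "numeric") == other for t in vals[1:]):
--         kinds.add(other)
--     return kinds
-- ===== Notes on version B (the rewrite author's own statement) =====
-- stated objective: alternative
-- what changed: Replaces A's single accumulation loop (classify each token, add to the growing set) by classifying only the first token and then one any()-existence scan over the rest for the opposite kind.
import Mathlib
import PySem

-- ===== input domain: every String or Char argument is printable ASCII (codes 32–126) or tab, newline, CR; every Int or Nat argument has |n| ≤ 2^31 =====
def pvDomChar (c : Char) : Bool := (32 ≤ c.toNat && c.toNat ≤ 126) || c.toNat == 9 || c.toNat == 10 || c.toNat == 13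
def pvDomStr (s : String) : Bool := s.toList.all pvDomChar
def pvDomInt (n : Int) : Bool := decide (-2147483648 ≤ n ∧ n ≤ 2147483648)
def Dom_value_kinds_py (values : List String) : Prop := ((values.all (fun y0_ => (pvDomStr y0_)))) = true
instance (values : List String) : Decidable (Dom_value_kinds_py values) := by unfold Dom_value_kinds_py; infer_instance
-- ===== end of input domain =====

-- B classifies the first token and then makes one any()-existence scan of the rest for the
-- opposite kind, instead of A's accumulation loop; same result, alternative decomposition.

-- ===== PORT A =====
def value_kinds_py (values : List String) : List String :=
  values.foldl
    (fun kinds token =>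
      if PySem.Str.endswith token "%" then PySem.Set.add kinds "percentage"
      else PySem.Set.add kinds "numeric")
    PySem.Set.empty

-- ===== PORT B =====
def value_kinds_py_alt (values : List String) : List String :=
  match values with
  | [] => PySem.Set.empty
  | v :: rest =>
    let first := if PySem.Str.endswith v "%" then "percentage" else "numeric"
    let other := if first == "percentage" then "numeric" else "percentage"
    let kinds : PySem.Set String := PySem.Set.add PySem.Set.empty first
    if rest.any (fun t => (if PySem.Str.endswith t "%" then "percentage" else "numeric") == other)
    then PySem.Set.add kinds other else kinds

-- ===== PRECONDITION & SPEC =====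
def Spec_value_kinds_py (values : List String) (out : List String) : Prop := out = value_kinds_py_alt values
instance (values : List String) (out : List String) : Decidable (Spec_value_kinds_py values out) := by unfold Spec_value_kinds_py; infer_instance

-- ===== CLAIM (what is proved, stated in full; the proofs are below) =====
def Claim_equal_value_kinds_py : Prop := ∀ (values : List String), Dom_value_kinds_py values → Spec_value_kinds_py values (value_kinds_py values)

-- ===== LEMMAS AND PROOFS =====

-- the kind of a single token
def pvK (t : String) : String := if PySem.Str.endswith t "%" then "percentage" else "numeric"

theorem pvSetAdd_mem {s : PySem.Set String} {x : String} (h : x ∈ s) :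
    PySem.Set.add s x = s := by
  simp [PySem.Set.add, h]

theorem pvMem_add (s : PySem.Set String) (x y : String) (h : y ∈ s ∨ y = x) :
    y ∈ PySem.Set.add s x := by
  simp [PySem.Set.add]
  split <;> rcases h with h | h <;> simp_all

theorem pvAbsorb (l : List String) (s : PySem.Set String)
    (h : ∀ t ∈ l, pvK t ∈ s) :
    l.foldl (fun s t => PySem.Set.add s (pvK t)) s = s := by
  induction l with
  | nil => rfl
  | cons t rest ih =>
    simp only [List.foldl_cons, pvSetAdd_mem (h t (by simp))]
    exact ih (fun u hu => h u (by simp [hu]))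

theorem pvScan (l : List String) (s : PySem.Set String) (k other : String)
    (hK : ∀ t, pvK t = k ∨ pvK t = other) (hk : k ∈ s) (hne : k ≠ other) :
    l.foldl (fun s t => PySem.Set.add s (pvK t)) s =
      if l.any (fun t => pvK t == other) then PySem.Set.add s other else s := by
  induction l with
  | nil => simp
  | cons t rest ih =>
    rcases hK t with h | h
    · simp only [List.foldl_cons, h, pvSetAdd_mem hk, List.any_cons, ih]
      have : (k == other) = false := by simpa using hne
      simp [this]
    · simp only [List.foldl_cons, h, List.any_cons]
      have habs : rest.foldl (fun s t => PySem.Set.add s (pvK t)) (PySem.Set.add s other) =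
          PySem.Set.add s other := by
        apply pvAbsorb
        intro u _
        rcases hK u with h' | h' <;> rw [h']
        · exact pvMem_add s other k (Or.inl hk)
        · exact pvMem_add s other other (Or.inr rfl)
      simp [habs]

-- ===== VERDICT (by name: the statement is the Claim_ definition above) =====
theorem value_kinds_py_spec : Claim_equal_value_kinds_py := by
  intro values _
  unfold Spec_value_kinds_py value_kinds_py value_kinds_py_alt
  have hfun : (fun (kinds : PySem.Set String) (token : String) =>
      if PySem.Str.endswith token "%" then PySem.Set.add kinds "percentage"
      else PySem.Set.add kinds "numeric")
      = fun kinds token => PySem.Set.add kinds (pvK token) := by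
    funext s t; unfold pvK; split <;> rfl
  rw [hfun]
  have hK : ∀ t, pvK t = "percentage" ∨ pvK t = "numeric" := by
    intro t; unfold pvK; split <;> simp
  cases values with
  | nil => rfl
  | cons v rest =>
    simp only [List.foldl_cons]
    by_cases h : PySem.Str.endswith v "%" = true
    · simp only [h, ↓reduceIte, beq_self_eq_true]
      rw [show (fun t => (if PySem.Str.endswith t "%" then "percentage" else "numeric")
            == ("numeric" : String)) = (fun t => pvK t == "numeric") from
          funext (fun t => by simp only [pvK])]
      rw [show pvK v = "percentage" by simp only [pvK, h, ↓reduceIte]]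
      exact pvScan rest (PySem.Set.add PySem.Set.empty "percentage") "percentage" "numeric" (fun t => hK t) (by decide) (by decide)
    · simp only [h, Bool.false_eq_true, ↓reduceIte, String.reduceBEq]
      rw [show (fun t => (if PySem.Str.endswith t "%" then "percentage" else "numeric")
            == ("percentage" : String)) = (fun t => pvK t == "percentage") from
          funext (fun t => by simp only [pvK])]
      rw [show pvK v = "numeric" by simp only [pvK, h, Bool.false_eq_true, ↓reduceIte]]
      exact pvScan rest (PySem.Set.add PySem.Set.empty "numeric") "numeric" "percentage" (fun t => (hK t).symm) (by decide) (by decide)
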